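-- pv_equiv track=rewrite | github.com/MrBrantCode/unitest_baseline | mut_generate/mist_train_cf/cf_48587/solution.py | peculiar_ordering
-- ===== SOURCE A (Python) =====
-- def peculiar_ordering(lst):
--     lst = [val for val in lst if val is not None] # Remove None values
--     sorted_list = sorted(lst, reverse=True) # Sort list in reverse order
--
--     result = []
--     while sorted_list:
--         if sorted_list:
--             result.append(sorted_list.pop())  # pick up smallest
--         if sorted_list:
--             result.append(sorted_list.pop(0))  # pick up largest
--
--     return result
-- ===== SOURCE B (Python) =====
-- def peculiar_ordering(lst):
--     s = sorted(v for v in lst if v is not None)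
--     k = (len(s) + 1) // 2
--     lows = s[:k]
--     highs = s[k:][::-1]
--     out = []
--     for lo, hi in zip(lows, highs):
--         out += [lo, hi]
--     if len(highs) < len(lows):
--         out.append(lows[-1])
--     return out
-- ===== Notes on version B (the rewrite author's own statement) =====
-- stated objective: idiomatic
-- what changed: Replaces the destructive while-loop that pops the smallest from the end and the largest from the front of a reverse-sorted list with a split of the ascending-sorted list into a low half and a reversed high half that are zipped together (plus the leftover middle element for odd lengths).
import Mathlib
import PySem

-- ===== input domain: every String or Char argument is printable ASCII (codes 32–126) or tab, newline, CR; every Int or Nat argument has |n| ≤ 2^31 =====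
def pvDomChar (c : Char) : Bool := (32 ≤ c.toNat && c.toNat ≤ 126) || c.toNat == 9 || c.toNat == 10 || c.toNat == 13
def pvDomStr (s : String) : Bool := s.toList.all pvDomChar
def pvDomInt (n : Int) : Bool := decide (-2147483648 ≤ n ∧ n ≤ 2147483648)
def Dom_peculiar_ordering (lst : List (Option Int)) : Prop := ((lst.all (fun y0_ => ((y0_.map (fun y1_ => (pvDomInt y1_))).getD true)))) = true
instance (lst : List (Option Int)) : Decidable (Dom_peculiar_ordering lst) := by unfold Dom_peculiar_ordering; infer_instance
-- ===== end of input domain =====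

-- B replaces A's destructive pop-smallest-from-end / pop-largest-from-front loop by
-- splitting the ascending-sorted list into a low half and a reversed high half and
-- zipping them (idiomatic decomposition; return value proved equal).

-- ===== PORT A =====
-- the while-loop: pop() takes the last element, pop(0) the first, until empty
def pvALoop (s : List Int) : List Int :=
  if h : s = [] then []
  else
    let x := s.getLast h
    let s1 := s.dropLast
    if h1 : s1 = [] then [x]
    else x :: s1.head h1 :: pvALoop s1.tail
termination_by s.length
decreasing_by
  have hs : 0 < s.length := List.length_pos_iff.mpr h
  simp [List.length_tail, List.length_dropLast]
  omega

def peculiar_ordering (lst : List (Option Int)) : List Int :=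
  let filtered := lst.filterMap id
  let sorted_list := PySem.List.sorted filtered (fun x => x) true
  pvALoop sorted_list

-- ===== PORT B =====
def peculiar_ordering_alt (lst : List (Option Int)) : List Int :=
  let s := PySem.List.sorted (lst.filterMap id) (fun x => x) false
  let k := (s.length + 1) / 2
  let lows := s.take k
  let highs := (s.drop k).reverse
  let out := (lows.zip highs).foldl (fun out p => out ++ [p.1, p.2]) []
  if highs.length < lows.length then out ++ [lows.getLast?.getD 0] else out

-- ===== PRECONDITION & SPEC =====
def Spec_peculiar_ordering (lst : List (Option Int)) (out : List Int) : Prop := out = peculiar_ordering_alt lst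
instance (lst : List (Option Int)) (out : List Int) : Decidable (Spec_peculiar_ordering lst out) := by unfold Spec_peculiar_ordering; infer_instance

-- ===== CLAIM (what is proved, stated in full; the proofs are below) =====
def Claim_equal_peculiar_ordering : Prop := ∀ (lst : List (Option Int)), Dom_peculiar_ordering lst → Spec_peculiar_ordering lst (peculiar_ordering lst)

-- ===== LEMMAS AND PROOFS =====

-- clean two-ends interleaving (proof vocabulary)
def pvItl : List Int → List Int → List Int
  | [], _ => []
  | a :: _, [] => [a]
  | a :: as, b :: bs => a :: b :: pvItl as bs

theorem pvALoop_nil : pvALoop [] = [] := by simp [pvALoop]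

theorem pvALoop_concat (t : List Int) (a : Int) (ht : t ≠ []) :
    pvALoop (t ++ [a]) = a :: t.head ht :: pvALoop t.tail := by
  rw [pvALoop]
  have hne : t ++ [a] ≠ [] := by simp
  rw [dif_neg hne]
  have h1 : (t ++ [a]).getLast hne = a := by simp
  have h2 : (t ++ [a]).dropLast = t := by simp
  simp only [h1, h2, dif_neg ht]

theorem pvALoop_singleton (a : Int) : pvALoop [a] = [a] := by
  rw [pvALoop]; simp

-- core structural lemma: A's two-ended consumption of S.reverse equals the split-and-zip
theorem pvALoop_reverse (S : List Int) :
    pvALoop S.reverse =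
      pvItl (S.take ((S.length + 1) / 2)) ((S.drop ((S.length + 1) / 2)).reverse) := by
  induction S using List.bidirectionalRec with
  | nil => simp [pvALoop_nil, pvItl]
  | singleton a => simp [pvALoop_singleton, pvItl]
  | cons_append a M b ih =>
    have hk' : (M.length + 1) / 2 ≤ M.length := by omega
    have hlen : (a :: (M ++ [b])).length = M.length + 2 := by simp
    have hkeq : ((a :: (M ++ [b])).length + 1) / 2 = (M.length + 1) / 2 + 1 := by
      rw [hlen]; omega
    have hrev : (a :: (M ++ [b])).reverse = (b :: M.reverse) ++ [a] := by simp
    rw [hrev, pvALoop_concat (b :: M.reverse) a (by simp)]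
    simp only [List.head_cons, List.tail_cons]
    rw [ih, hkeq]
    have htake : (a :: (M ++ [b])).take ((M.length + 1) / 2 + 1)
        = a :: M.take ((M.length + 1) / 2) := by
      simp [List.take_append_of_le_length hk']
    have hdrop : (a :: (M ++ [b])).drop ((M.length + 1) / 2 + 1)
        = M.drop ((M.length + 1) / 2) ++ [b] := by
      simp [List.drop_append_of_le_length hk']
    rw [htake, hdrop]
    simp [pvItl]

-- the foldl over the zip, plus the odd leftover, is pvItl (under the half-split length facts)
theorem pvFoldl_zip (lows highs : List Int) (acc : List Int) :
    (lows.zip highs).foldl (fun out p => out ++ [p.1, p.2]) acc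
      = acc ++ (lows.zip highs).foldl (fun out p => out ++ [p.1, p.2]) [] := by
  induction lows generalizing highs acc with
  | nil => simp
  | cons a as ih =>
    cases highs with
    | nil => simp
    | cons b bs =>
      simp only [List.zip_cons_cons, List.foldl_cons]
      rw [ih bs (acc ++ [a, b]), ih bs ([] ++ [a, b])]
      simp

theorem pvZip_eq_itl (lows highs : List Int)
    (h1 : highs.length ≤ lows.length) (h2 : lows.length ≤ highs.length + 1) :
    (if highs.length < lows.length
      then (lows.zip highs).foldl (fun out p => out ++ [p.1, p.2]) [] ++ [lows.getLast?.getD 0]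
      else (lows.zip highs).foldl (fun out p => out ++ [p.1, p.2]) [])
    = pvItl lows highs := by
  induction lows generalizing highs with
  | nil =>
    have : highs = [] := by
      cases highs with
      | nil => rfl
      | cons b bs => simp at h1
    subst this; simp [pvItl]
  | cons a as ih =>
    cases highs with
    | nil =>
      have : as = [] := by
        cases as with
        | nil => rfl
        | cons c cs => simp at h2
      subst this
      simp [pvItl]
    | cons b bs =>
      simp only [List.zip_cons_cons, List.foldl_cons, List.nil_append]
      have h1' : bs.length ≤ as.length := by simpa using h1
      have h2' : as.length ≤ bs.length + 1 := by simpa using h2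
      have := ih bs h1' h2'
      rw [pvFoldl_zip as bs [a, b]]
      by_cases hc : bs.length < as.length
      · have hlt : (b :: bs).length < (a :: as).length := by simpa using hc
        rw [if_pos hlt] at *
        rw [if_pos hc] at this
        have hasne : as ≠ [] := by
          cases as with
          | nil => simp at hc
          | cons _ _ => simp
        have hlast : (a :: as).getLast?.getD 0 = as.getLast?.getD 0 := by
          cases as with
          | nil => exact absurd rfl hasne
          | cons c cs => simp [List.getLast?_cons_cons]
        simp only [hlast, pvItl]
        rw [List.append_assoc, this]
        simp
      · have hge : ¬ (b :: bs).length < (a :: as).length := by simpa using hc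
        rw [if_neg hge]
        rw [if_neg hc] at this
        rw [this]
        simp [pvItl]

-- reverse-sorted equals reverse of ascending sorted (identity key over Int)
theorem pvSorted_rev_eq_reverse (xs : List Int) :
    PySem.List.sorted xs (fun x => x) true = (PySem.List.sorted xs (fun x => x) false).reverse := by
  have hperm : (PySem.List.sorted xs (fun x => x) true).Perm
      ((PySem.List.sorted xs (fun x => x) false).reverse) := by
    refine (PySem.List.sorted_perm xs (fun x => x) true).trans ?_
    exact ((List.reverse_perm _).trans (PySem.List.sorted_perm xs (fun x => x) false)).symm
  have hp1 : (PySem.List.sorted xs (fun x => x) true).Pairwise (fun a b : Int => b ≤ a) :=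
    PySem.List.sorted_pairwise_rev xs (fun x => x)
  have hp2 : ((PySem.List.sorted xs (fun x => x) false).reverse).Pairwise (fun a b : Int => b ≤ a) := by
    rw [List.pairwise_reverse]
    exact PySem.List.sorted_pairwise xs (fun x => x)
  exact hperm.eq_of_pairwise (fun a b _ _ h1 h2 => le_antisymm h2 h1) hp1 hp2

-- ===== VERDICT (by name: the statement is the Claim_ definition above) =====
theorem peculiar_ordering_spec : Claim_equal_peculiar_ordering := by
  intro lst _
  unfold Spec_peculiar_ordering peculiar_ordering peculiar_ordering_alt
  simp only []
  set S := PySem.List.sorted (lst.filterMap id) (fun x => x) false with hS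
  rw [pvSorted_rev_eq_reverse, pvALoop_reverse]
  have h1 : ((S.drop ((S.length + 1) / 2)).reverse).length ≤ (S.take ((S.length + 1) / 2)).length := by
    simp; omega
  have h2 : (S.take ((S.length + 1) / 2)).length ≤ ((S.drop ((S.length + 1) / 2)).reverse).length + 1 := by
    simp; omega
  exact (pvZip_eq_itl _ _ h1 h2).symm
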